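-- pv_equiv track=rewrite | github.com/welovecherry/library_agent | 00_src/nodes/ingest_catalog_v2.py | _pick_html_text
-- ===== SOURCE A (Python) =====
-- from typing import Any, List, Optional
--
-- def _pick_html_text(cands: List[str]) -> tuple[Optional[str], Optional[str]]:
--     """후보 중 HTML(‘<html’)과 TEXT(그 외) 최장 문자열 각각 선택."""
--     html_val, text_val = None, None
--     maxh, maxt = -1, -1
--     for s in cands:
--         sc = s.lstrip()
--         if "<html" in sc.lower():
--             if len(s) > maxh:
--                 html_val, maxh = s, len(s)
--         else:
--             if len(s) > maxt:
--                 text_val, maxt = s, len(s)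
--     return html_val, text_val
-- ===== SOURCE B (Python) =====
-- from typing import List, Optional
--
--
-- def _is_html(s: str) -> bool:
--     return "<html" in s.lstrip().lower()
--
--
-- def _pick_html_text(cands: List[str]) -> tuple[Optional[str], Optional[str]]:
--     """Classify-then-reduce: split candidates into HTML / non-HTML groups,
--     then take the longest of each group (first on ties), None if empty."""
--     html_group = [s for s in cands if _is_html(s)]
--     text_group = [s for s in cands if not _is_html(s)]
--     return (max(html_group, key=len, default=None),
--             max(text_group, key=len, default=None))
-- ===== Notes on version B (the rewrite author's own statement) =====
-- stated objective: simpler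
-- what changed: Replaced A's single interleaved loop carrying two running-max accumulators with a classify-then-reduce decomposition: filter the candidates into HTML and non-HTML groups, then take the longest of each group with max(key=len, default=None).
import Mathlib
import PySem

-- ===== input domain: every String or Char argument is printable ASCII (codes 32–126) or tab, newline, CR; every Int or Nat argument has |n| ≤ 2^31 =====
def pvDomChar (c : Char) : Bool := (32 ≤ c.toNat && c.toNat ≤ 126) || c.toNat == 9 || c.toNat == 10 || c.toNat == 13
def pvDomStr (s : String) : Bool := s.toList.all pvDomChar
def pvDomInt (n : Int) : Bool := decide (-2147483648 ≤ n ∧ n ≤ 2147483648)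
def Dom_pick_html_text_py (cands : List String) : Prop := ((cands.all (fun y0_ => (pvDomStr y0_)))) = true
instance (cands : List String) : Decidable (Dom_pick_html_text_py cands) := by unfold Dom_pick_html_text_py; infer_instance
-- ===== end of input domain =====

-- B replaces A's single interleaved loop (two running-max accumulators) with a
-- classify-then-reduce decomposition: filter into HTML / non-HTML groups, then
-- take the longest of each (objective: simpler; same cost).

-- ===== PORT A =====
-- one loop step of A: state = (html_val, text_val, maxh, maxt)
def pvStepA (st : Option String × Option String × Int × Int) (s : String) :
    Option String × Option String × Int × Int :=
  let sc := PySem.Str.lstrip s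
  if PySem.Str.isIn "<html" (PySem.Str.lower sc) then
    if PySem.Str.len s > st.2.2.1 then (some s, st.2.1, PySem.Str.len s, st.2.2.2) else st
  else
    if PySem.Str.len s > st.2.2.2 then (st.1, some s, st.2.2.1, PySem.Str.len s) else st

def pick_html_text_py (cands : List String) : Option String × Option String :=
  let r := cands.foldl pvStepA (none, none, -1, -1)
  (r.1, r.2.1)

-- ===== PORT B =====
def pvIsHtml (s : String) : Bool :=
  PySem.Str.isIn "<html" (PySem.Str.lower (PySem.Str.lstrip s))

def pick_html_text_py_alt (cands : List String) : Option String × Option String :=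
  let html_group := cands.filter (fun s => pvIsHtml s)
  let text_group := cands.filter (fun s => !pvIsHtml s)
  (PySem.List.max? html_group PySem.Str.len,
   PySem.List.max? text_group PySem.Str.len)

-- ===== PRECONDITION & SPEC =====
def Spec_pick_html_text_py (cands : List String) (out : Option String × Option String) : Prop := out = pick_html_text_py_alt cands
instance (cands : List String) (out : Option String × Option String) : Decidable (Spec_pick_html_text_py cands out) := by unfold Spec_pick_html_text_py; infer_instance

-- ===== CLAIM (what is proved, stated in full; the proofs are below) =====
def Claim_equal_pick_html_text_py : Prop := ∀ (cands : List String), Dom_pick_html_text_py cands → Spec_pick_html_text_py cands (pick_html_text_py cands)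

-- ===== LEMMAS AND PROOFS =====

-- the length A's loop remembers for a stored candidate: -1 for None, len v for v
def pvLenOr (o : Option String) : Int :=
  match o with
  | none => -1
  | some v => PySem.Str.len v

-- the step of PySem.List.max? with key = Str.len
def pvMStep (acc : Option String) (s : String) : Option String :=
  match acc with
  | none => some s
  | some m => if PySem.Str.len m < PySem.Str.len s then some s else some m

theorem pvLen_nonneg (s : String) : 0 ≤ PySem.Str.len s := by
  simp [PySem.Str.len_eq]

theorem pvStepA_eq (h t : Option String) (s : String) :
    pvStepA (h, t, pvLenOr h, pvLenOr t) s =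
      if pvIsHtml s then (pvMStep h s, t, pvLenOr (pvMStep h s), pvLenOr t)
      else (h, pvMStep t s, pvLenOr h, pvLenOr (pvMStep t s)) := by
  have hs := pvLen_nonneg s
  cases h <;> cases t <;>
    simp only [pvStepA, pvIsHtml, pvMStep, pvLenOr] <;>
    split <;> simp_all <;> first | omega | (split <;> simp_all)

theorem pvLoopA (cs : List String) (h t : Option String) :
    cs.foldl pvStepA (h, t, pvLenOr h, pvLenOr t) =
      ((cs.filter (fun s => pvIsHtml s)).foldl pvMStep h,
       (cs.filter (fun s => !pvIsHtml s)).foldl pvMStep t,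
       pvLenOr ((cs.filter (fun s => pvIsHtml s)).foldl pvMStep h),
       pvLenOr ((cs.filter (fun s => !pvIsHtml s)).foldl pvMStep t)) := by
  induction cs generalizing h t with
  | nil => simp
  | cons s cs ih =>
    simp only [List.foldl_cons, pvStepA_eq, List.filter_cons]
    by_cases hp : pvIsHtml s = true <;> simp [hp, ih]

theorem pvMaxFold (g : List String) :
    PySem.List.max? g PySem.Str.len = g.foldl pvMStep none := by
  simp only [PySem.List.max?]
  congr 1
  funext acc s
  cases acc <;> simp [pvMStep]

-- ===== VERDICT (by name: the statement is the Claim_ definition above) =====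
theorem pick_html_text_py_spec : Claim_equal_pick_html_text_py := by
  intro cands _
  unfold Spec_pick_html_text_py pick_html_text_py pick_html_text_py_alt
  have := pvLoopA cands none none
  simp only [pvLenOr] at this
  simp [this, pvMaxFold]
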